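-- pv_equiv track=rewrite | github.com/jxmen/Crack-the-Coding-Interview | LeetCode/Hard/0410-split-array-largest-sum/0410-split-array-largest-sum.py | getSplitCount
-- ===== SOURCE A (Python) =====
-- from typing import List
--
-- def getSplitCount(nums: List[int], middle: int) -> int:
--     splits = 1
--     total = 0
--
--     for num in nums:
--         if (total + num) <= middle:
--             total += num
--         else:
--             splits += 1
--             total = num
--
--     return splits
-- ===== SOURCE B (Python) =====
-- from typing import List
--
-- def getSplitCount(nums: List[int], middle: int) -> int:
--     # Build a prefix-sum table once, then count segment breaks by comparing
--     # each prefix sum against the base prefix recorded at the segment start.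
--     prefix = [0]
--     for x in nums:
--         prefix.append(prefix[-1] + x)
--     count = 1
--     base = 0
--     prev = 0
--     for p in prefix[1:]:
--         if p - base > middle:
--             count += 1
--             base = prev
--         prev = p
--     return count
-- ===== Notes on version B (the rewrite author's own statement) =====
-- stated objective: alternative
-- what changed: Replaces the running-total accumulator with a precomputed prefix-sum table: segment breaks are detected by comparing each prefix sum against the base prefix recorded at the last break, so no per-segment total is ever reset.
import Mathlib
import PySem

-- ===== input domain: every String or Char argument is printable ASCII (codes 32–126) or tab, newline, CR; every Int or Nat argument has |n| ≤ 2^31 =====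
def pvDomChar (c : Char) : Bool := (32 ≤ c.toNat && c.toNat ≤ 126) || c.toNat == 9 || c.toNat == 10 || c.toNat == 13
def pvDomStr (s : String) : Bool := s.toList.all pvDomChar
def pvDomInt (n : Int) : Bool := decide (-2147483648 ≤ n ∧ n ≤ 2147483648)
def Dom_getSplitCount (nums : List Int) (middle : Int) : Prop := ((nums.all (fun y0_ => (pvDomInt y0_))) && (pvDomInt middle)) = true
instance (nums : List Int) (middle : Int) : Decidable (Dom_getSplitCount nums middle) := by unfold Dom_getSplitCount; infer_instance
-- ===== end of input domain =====

-- B replaces A's resetting running total with a prefix-sum table built first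
-- and a base-prefix comparison per element (alternative decomposition, same cost).

-- ===== PORT A =====
def getSplitCount (nums : List Int) (middle : Int) : Int :=
  let st := nums.foldl
    (fun (st : Int × Int) num =>
      if st.2 + num ≤ middle then (st.1, st.2 + num)
      else (st.1 + 1, num))
    (1, 0)
  st.1

-- ===== PORT B =====
-- prefix[-1] is ported with pyGetD (default never used: the accumulator starts [0] and only grows)
def getSplitCount_alt (nums : List Int) (middle : Int) : Int :=
  let pre : List Int := nums.foldl (fun acc x => acc ++ [PySem.List.pyGetD acc (-1) 0 + x]) [0]
  let st := (PySem.List.slice pre (some 1) none).foldl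
    (fun (st : Int × Int × Int) p =>
      if p - st.2.1 > middle then (st.1 + 1, st.2.2, p)
      else (st.1, st.2.1, p))
    (1, 0, 0)
  st.1

-- ===== PRECONDITION & SPEC =====
def Spec_getSplitCount (nums : List Int) (middle : Int) (out : Int) : Prop := out = getSplitCount_alt nums middle
instance (nums : List Int) (middle : Int) (out : Int) : Decidable (Spec_getSplitCount nums middle out) := by unfold Spec_getSplitCount; infer_instance

-- ===== CLAIM (what is proved, stated in full; the proofs are below) =====
def Claim_equal_getSplitCount : Prop := ∀ (nums : List Int) (middle : Int), Dom_getSplitCount nums middle → Spec_getSplitCount nums middle (getSplitCount nums middle)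

-- ===== LEMMAS AND PROOFS =====

/-- The running prefix sums of `nums` continuing from total `t`. -/
def pvSums (t : Int) : List Int → List Int
  | [] => []
  | x :: xs => (t + x) :: pvSums (t + x) xs

/-- B's prefix-building fold extends any accumulator ending in `t` by `pvSums t nums`. -/
theorem pv_pre_eq (nums : List Int) : ∀ (acc : List Int) (t : Int),
    nums.foldl (fun acc x => acc ++ [PySem.List.pyGetD acc (-1) 0 + x]) (acc ++ [t])
      = (acc ++ [t]) ++ pvSums t nums := by
  induction nums with
  | nil => intro acc t; simp [pvSums]
  | cons x xs ih =>
    intro acc t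
    simp only [List.foldl_cons, PySem.List.pyGetD_neg_one_append_singleton, pvSums]
    have h := ih (acc ++ [t]) (t + x)
    simp only [List.append_assoc] at h ⊢
    exact h

/-- Loop correspondence: B's fold over the segment sums from `prev` with base `base`
    computes the same count as A's fold with total `prev - base`. -/
theorem pv_loop (middle : Int) (nums : List Int) : ∀ (c base prev : Int),
    ((pvSums prev nums).foldl
      (fun (st : Int × Int × Int) p =>
        if p - st.2.1 > middle then (st.1 + 1, st.2.2, p)
        else (st.1, st.2.1, p)) (c, base, prev)).1
    = (nums.foldl
      (fun (st : Int × Int) num =>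
        if st.2 + num ≤ middle then (st.1, st.2 + num)
        else (st.1 + 1, num)) (c, prev - base)).1 := by
  induction nums with
  | nil => intro c base prev; simp [pvSums]
  | cons x xs ih =>
    intro c base prev
    simp only [pvSums, List.foldl_cons]
    by_cases h : prev - base + x ≤ middle
    · have h1 : ¬ (prev + x - base > middle) := by omega
      rw [if_neg h1, if_pos h, ih c base (prev + x)]
      have h2 : prev + x - base = prev - base + x := by ring
      rw [h2]
    · have h1 : prev + x - base > middle := by omega
      rw [if_pos h1, if_neg h, ih (c + 1) prev (prev + x)]
      have h2 : prev + x - prev = x := by ring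
      rw [h2]

-- ===== VERDICT (by name: the statement is the Claim_ definition above) =====
theorem getSplitCount_spec : Claim_equal_getSplitCount := by
  intro nums middle _
  unfold Spec_getSplitCount getSplitCount getSplitCount_alt
  have hpre := pv_pre_eq nums ([] : List Int) 0
  simp only [List.nil_append] at hpre
  simp only [hpre, PySem.List.slice_from_one, List.cons_append, List.nil_append,
    List.tail_cons]
  have := pv_loop middle nums 1 0 0
  simpa using this.symm
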